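-- pv_equiv track=rewrite | github.com/Scaleup-Excellenteam/google-team4 | auto_complete/src/backend/search.py | _one_added_in_query
-- ===== SOURCE A (Python) =====
-- from typing import Optional, List
--
-- def _one_added_in_query(q: str, t: str) -> Optional[int]:
--     """Returns the 1-based position in query where an extra letter was added, or None if not exactly one."""
--     assert len(q) == len(t) + 1
--     i = j = 0
--     extra_pos: Optional[int] = None
--     while i < len(q) and j < len(t):
--         if q[i] == t[j]:
--             i += 1
--             j += 1
--         else:
--             if extra_pos is not None:
--                 return None
--             extra_pos = i + 1
--             i += 1
--     if extra_pos is None: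
--         extra_pos = len(q)
--     return extra_pos
-- ===== SOURCE B (Python) =====
-- from typing import Optional
--
-- def _one_added_in_query(q: str, t: str) -> Optional[int]:
--     """Returns the 1-based position in query where an extra letter was added, or None if not exactly one."""
--     assert len(q) == len(t) + 1
--     p = 0
--     while p < len(t) and q[p] == t[p]:
--         p += 1
--     return p + 1 if q[p+1:] == t[p:] else None
-- ===== Notes on version B (the rewrite author's own statement) =====
-- stated objective: simpler
-- what changed: Replaces the two-pointer state machine with an Optional extra_pos flag by a common-prefix-length scan followed by one suffix slice comparison.
import Mathlib
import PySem

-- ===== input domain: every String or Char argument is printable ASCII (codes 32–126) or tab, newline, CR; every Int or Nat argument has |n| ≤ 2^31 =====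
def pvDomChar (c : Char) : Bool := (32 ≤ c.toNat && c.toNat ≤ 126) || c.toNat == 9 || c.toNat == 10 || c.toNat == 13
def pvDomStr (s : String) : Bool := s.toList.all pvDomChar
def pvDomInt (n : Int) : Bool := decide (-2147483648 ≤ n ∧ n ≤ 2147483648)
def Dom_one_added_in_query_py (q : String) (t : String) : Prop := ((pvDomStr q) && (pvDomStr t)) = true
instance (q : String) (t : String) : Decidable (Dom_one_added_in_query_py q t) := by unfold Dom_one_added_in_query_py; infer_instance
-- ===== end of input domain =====

-- B replaces A's two-pointer state machine (with an Optional extra_pos flag) by a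
-- common-prefix-length scan followed by one suffix slice comparison; objective: simpler.

-- ===== PORT A =====
-- the while loop of A: indices i into q and j into t, extra = extra_pos
def pvALoop (q t : List Char) (i j : Nat) (extra : Option Int) : Option Int :=
  if h : i < q.length ∧ j < t.length then
    if q[i]'h.1 = t[j]'h.2 then
      pvALoop q t (i+1) (j+1) extra
    else
      match extra with
      | some _ => none
      | none => pvALoop q t (i+1) j (some ((i : Int) + 1))
  else
    match extra with
    | none => some (q.length : Int)
    | some e => some e
termination_by q.length - i
decreasing_by all_goals omega

def one_added_in_query_py (q : String) (t : String) : Option Int :=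
  pvALoop q.toList t.toList 0 0 none

-- ===== PORT B =====
-- B's while loop: common-prefix length p (q is strictly longer than t inside Pre_, so
-- matching both lists structurally is exact for the loop's `p < len(t) and q[p] == t[p]`)
def pvCpl : List Char → List Char → Nat
  | a :: as, b :: bs => if a = b then pvCpl as bs + 1 else 0
  | _, _ => 0

def one_added_in_query_py_alt (q : String) (t : String) : Option Int :=
  let ql := q.toList
  let tl := t.toList
  let p := pvCpl ql tl
  if ql.drop (p+1) = tl.drop p then some ((p : Int) + 1) else none

-- ===== PRECONDITION & SPEC =====
-- Pre_: the assert `len(q) == len(t) + 1`; A raises AssertionError otherwise.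
def Pre_one_added_in_query_py (q : String) (t : String) : Prop :=
  q.toList.length = t.toList.length + 1
instance (q : String) (t : String) : Decidable (Pre_one_added_in_query_py q t) := by
  unfold Pre_one_added_in_query_py; infer_instance

def pvWitness_one_added_in_query_py : String × String := ("ab", "a")

def Spec_one_added_in_query_py (q : String) (t : String) (out : Option Int) : Prop := out = one_added_in_query_py_alt q t
instance (q : String) (t : String) (out : Option Int) : Decidable (Spec_one_added_in_query_py q t out) := by unfold Spec_one_added_in_query_py; infer_instance

-- ===== CLAIM (what is proved, stated in full; the proofs are below) =====
def Claim_equal_one_added_in_query_py : Prop := ∀ (q : String) (t : String), Dom_one_added_in_query_py q t → Pre_one_added_in_query_py q t → Spec_one_added_in_query_py q t (one_added_in_query_py q t)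

-- ===== LEMMAS AND PROOFS =====

-- phase 2 of A's loop: one extra char already skipped (i = j+1, extra = some e);
-- the loop returns e iff the remaining suffixes coincide.
theorem pvALoop_some (q t : List Char) (e : Int) (hl : q.length = t.length + 1) :
    ∀ j, pvALoop q t (j+1) j (some e) =
      if q.drop (j+1) = t.drop j then some e else none := by
  intro j
  induction hd : t.length - j using Nat.strong_induction_on generalizing j with
  | _ n ih =>
    rw [pvALoop]
    by_cases h : j + 1 < q.length ∧ j < t.length
    · have hq : j + 1 < q.length := h.1
      have ht : j < t.length := h.2
      rw [dif_pos h]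
      have hdq : q.drop (j+1) = q[j+1] :: q.drop (j+1+1) := List.drop_eq_getElem_cons hq
      have hdt : t.drop j = t[j] :: t.drop (j+1) := List.drop_eq_getElem_cons ht
      by_cases hc : q[j+1]'hq = t[j]'ht
      · rw [if_pos hc, ih (t.length - (j+1)) (by omega) (j+1) rfl]
        have hcond : (q.drop (j+1+1) = t.drop (j+1)) ↔ (q.drop (j+1) = t.drop j) := by
          rw [hdq, hdt, hc]
          simp only [List.cons.injEq, true_and]
        exact if_congr hcond rfl rfl
      · rw [if_neg hc]
        have hne : ¬ (q.drop (j+1) = t.drop j) := by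
          rw [hdq, hdt]
          simp only [List.cons.injEq, not_and]
          exact fun h' => absurd h' hc
        rw [if_neg hne]
    · rw [dif_neg h]
      have h1 : q.drop (j+1) = [] := List.drop_eq_nil_of_le (by omega)
      have h2 : t.drop j = [] := List.drop_eq_nil_of_le (by omega)
      rw [h1, h2, if_pos rfl]

-- phase 1 of A's loop (extra = None, i = j): A's result equals B's prefix/suffix formula
-- shifted by the current index i.
theorem pvALoop_none (q t : List Char) (hl : q.length = t.length + 1) :
    ∀ i, i ≤ t.length →
      pvALoop q t i i none =
        (if q.drop (i + pvCpl (q.drop i) (t.drop i) + 1) = t.drop (i + pvCpl (q.drop i) (t.drop i))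
         then some (((i + pvCpl (q.drop i) (t.drop i) : Nat) : Int) + 1) else none) := by
  intro i
  induction hd : t.length - i using Nat.strong_induction_on generalizing i with
  | _ n ih =>
    intro hi
    rw [pvALoop]
    by_cases h : i < q.length ∧ i < t.length
    · have hq : i < q.length := h.1
      have ht : i < t.length := h.2
      rw [dif_pos h]
      have hdq : q.drop i = q[i] :: q.drop (i+1) := List.drop_eq_getElem_cons hq
      have hdt : t.drop i = t[i] :: t.drop (i+1) := List.drop_eq_getElem_cons ht
      by_cases hc : q[i]'hq = t[i]'ht
      · rw [if_pos hc]
        have hp : pvCpl (q.drop i) (t.drop i) = pvCpl (q.drop (i+1)) (t.drop (i+1)) + 1 := by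
          rw [hdq, hdt, pvCpl, if_pos hc]
        rw [ih (t.length - (i+1)) (by omega) (i+1) rfl (by omega), hp]
        have harith : i + 1 + pvCpl (q.drop (i+1)) (t.drop (i+1)) =
            i + (pvCpl (q.drop (i+1)) (t.drop (i+1)) + 1) := by omega
        rw [harith]
      · rw [if_neg hc]
        have hp : pvCpl (q.drop i) (t.drop i) = 0 := by
          rw [hdq, hdt, pvCpl, if_neg hc]
        rw [pvALoop_some q t _ hl i, hp]
        norm_num
    · -- loop ends with extra = None: full prefix matched, A returns len(q)
      rw [dif_neg h]
      have hit : i = t.length := by omega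
      have hp : pvCpl (q.drop i) (t.drop i) = 0 := by
        have h2 : t.drop i = [] := List.drop_eq_nil_of_le (by omega)
        rw [h2]
        cases q.drop i <;> rfl
      have h1 : q.drop (i + 0 + 1) = [] := List.drop_eq_nil_of_le (by omega)
      have h2 : t.drop (i + 0) = [] := List.drop_eq_nil_of_le (by omega)
      rw [hp, h1, h2, if_pos rfl]
      simp only [Option.some.injEq, hl, hit]
      push_cast
      omega

-- ===== VERDICT (by name: the statement is the Claim_ definition above) =====
theorem one_added_in_query_py_spec : Claim_equal_one_added_in_query_py := by
  intro q t _ hpre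
  unfold Spec_one_added_in_query_py one_added_in_query_py one_added_in_query_py_alt
  have hl : q.toList.length = t.toList.length + 1 := hpre
  rw [pvALoop_none q.toList t.toList hl 0 (by omega)]
  simp
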